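-- pv_equiv track=rewrite | github.com/miles-igd/screenshot-to-OCR | scanner.py | _Scan_xy
-- ===== SOURCE A (Python) =====
-- from operator import itemgetter
-- from itertools import groupby, tee, islice, chain, product, zip_longest
--
-- def _Prev_and_next(iterable):
--     prevs, items, nexts = tee(iterable, 3)
--     prevs = chain([None], prevs)
--     nexts = chain(islice(nexts, 1, None), [None])
--     return zip(prevs, items, nexts)
--
-- def _Clean(segments, threshold):
--     to_remove = []
--     for segment in segments:
--         if segment[1] - segment[0] < threshold:
--             to_remove.append(segment)
--
--     for removing in to_remove:
--         segments.remove(removing)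
--
--     return segments
--
-- def _Scan_xy(img, threshold, sectors, clean = True):
--     ranges = []
--     for k,g in groupby(enumerate(sectors),lambda x:x[0]-x[1]):
--         group = (map(itemgetter(1),g))
--         group = list(map(int,group))
--         ranges.append((group[0],group[-1]))
--
--     segments = []
--
--     if not ranges:
--         return segments
--
--     current = ranges[0]
--
--     for _, item, nxt in _Prev_and_next(ranges):
--         if nxt is None:
--             segments.append(current)
--             continue
--
--         if nxt[0] - current[1] < threshold:
--             current = (current[0], nxt[1])
--         else:
--             segments.append(current)
--             current = nxt
--
--     if clean:
--         segments = _Clean(segments, threshold)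
--
--     return segments
-- ===== SOURCE B (Python) =====
-- def _Emit(current, segments, threshold, rng):
--     if current is None:
--         return rng
--     if rng[0] - current[1] < threshold:
--         return (current[0], rng[1])
--     segments.append(current)
--     return rng
--
-- def _Scan_xy(img, threshold, sectors, clean = True):
--     segments = []
--     current = None
--     run = None  # (key, first, last) of the consecutive run being built
--     for i, v in enumerate(sectors):
--         v = int(v)
--         if run is not None and i - v == run[0]:
--             run = (run[0], run[1], v)
--         else:
--             if run is not None:
--                 current = _Emit(current, segments, threshold, (run[1], run[2]))
--             run = (i - v, v, v)
--     if run is not None: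
--         current = _Emit(current, segments, threshold, (run[1], run[2]))
--     if current is not None:
--         segments.append(current)
--     if clean:
--         segments = [s for s in segments if s[1] - s[0] >= threshold]
--     return segments
-- ===== Notes on version B (the rewrite author's own statement) =====
-- stated objective: simpler
-- what changed: B fuses A's three separate passes (building the groupby ranges list, the tee/chain prev-and-next merge loop, and _Clean's build-to_remove-then-list.remove pass) into a single pass over enumerate(sectors) that tracks the current run and merges it into one current interval on the fly, finishing with a plain filter.
import Mathlib
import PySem

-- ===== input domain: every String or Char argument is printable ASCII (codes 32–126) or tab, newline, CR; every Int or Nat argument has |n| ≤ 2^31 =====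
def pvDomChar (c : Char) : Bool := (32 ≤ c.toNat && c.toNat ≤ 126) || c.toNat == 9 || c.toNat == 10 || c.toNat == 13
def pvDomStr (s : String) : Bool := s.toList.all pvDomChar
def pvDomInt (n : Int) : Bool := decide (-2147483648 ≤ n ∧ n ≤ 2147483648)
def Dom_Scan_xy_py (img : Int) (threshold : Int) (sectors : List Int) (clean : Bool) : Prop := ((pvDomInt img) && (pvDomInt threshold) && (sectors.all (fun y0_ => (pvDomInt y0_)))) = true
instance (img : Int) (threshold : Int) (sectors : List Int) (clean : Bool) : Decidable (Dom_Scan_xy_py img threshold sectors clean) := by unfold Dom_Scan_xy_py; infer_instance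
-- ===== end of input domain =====

-- B fuses A's three passes (groupby ranges, prev/next merge loop, _Clean's build-and-remove) into
-- one pass with a single `current` interval and a filter; objective: simpler (same return value).

-- ===== PORT A =====
-- itertools.groupby(enumerate(sectors), key = i - v): collect the values of each maximal run of
-- constant key.  `acc` is the current group, newest value first (so the group list is acc.reverse).
def aGroupsAux : List (Int × Int) → Int → List Int → List (List Int)
  | [], _, acc => [acc.reverse]
  | (i, v) :: rest, key, acc =>
      if i - v = key then aGroupsAux rest key (v :: acc)
      else acc.reverse :: aGroupsAux rest (i - v) [v]

-- A's merge-loop body over `_Prev_and_next(ranges)`: state = (current, segments); the `item`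
-- component of each triple is unused by A, so the fold runs over the `nxt` components.
def aStep (threshold : Int) (st : (Int × Int) × List (Int × Int)) (nxt : Option (Int × Int)) :
    (Int × Int) × List (Int × Int) :=
  match nxt with
  | none => (st.1, st.2 ++ [st.1])
  | some n => if n.1 - st.1.2 < threshold then ((st.1.1, n.2), st.2) else (n, st.2 ++ [st.1])

-- _Clean: first pass builds to_remove, second pass calls segments.remove on each (always found,
-- so the `getD` default branch of remove? is never taken).
def aClean (segments : List (Int × Int)) (threshold : Int) : List (Int × Int) :=
  (segments.foldl (fun acc s => if s.2 - s.1 < threshold then acc ++ [s] else acc) []).foldl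
    (fun segs r => (PySem.List.remove? segs r).getD segs) segments

def Scan_xy_py (img : Int) (threshold : Int) (sectors : List Int) (clean : Bool) : List (Int × Int) :=
  let ranges : List (Int × Int) :=
    match PySem.List.enumerate sectors 0 with
    | [] => []
    | (i, v) :: rest =>
        -- (group[0], group[-1]) for each group; groups are never empty, headD/getLastD defaults unreachable
        (aGroupsAux rest (i - v) [v]).map (fun g => (g.headD 0, g.getLastD 0))
  match ranges with
  | [] => []                                   -- "if not ranges: return segments" (before clean)
  | r0 :: rest =>
      let segments :=
        ((rest.map some ++ [none]).foldl (aStep threshold) (r0, [])).2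
      if clean then aClean segments threshold else segments

-- ===== PORT B =====
-- _Emit: merge one finished run-range into (current, segments).
def bEmit (threshold : Int) (st : Option (Int × Int) × List (Int × Int)) (rng : Int × Int) :
    Option (Int × Int) × List (Int × Int) :=
  match st.1 with
  | none => (some rng, st.2)
  | some cur =>
      if rng.1 - cur.2 < threshold then (some (cur.1, rng.2), st.2)
      else (some rng, st.2 ++ [cur])

-- B's single loop: `run` = (key, first, last) of the run being built, `st` = (current, segments);
-- the trailing flush of `run` is the [] case.
def bLoop (threshold : Int) :
    List (Int × Int) → Option (Int × Int × Int) → Option (Int × Int) × List (Int × Int) →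
    Option (Int × Int) × List (Int × Int)
  | [], run, st =>
      match run with
      | none => st
      | some (_, f, l) => bEmit threshold st (f, l)
  | (i, v) :: rest, run, st =>
      match run with
      | some (k, f, _l) =>
          if i - v = k then bLoop threshold rest (some (k, f, v)) st
          else bLoop threshold rest (some (i - v, v, v)) (bEmit threshold st (f, _l))
      | none => bLoop threshold rest (some (i - v, v, v)) st

def Scan_xy_py_alt (img : Int) (threshold : Int) (sectors : List Int) (clean : Bool) : List (Int × Int) :=
  let st := bLoop threshold (PySem.List.enumerate sectors 0) none (none, [])
  let segments := match st.1 with | none => st.2 | some c => st.2 ++ [c]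
  if clean then segments.filter (fun s => decide (threshold ≤ s.2 - s.1)) else segments

-- ===== PRECONDITION & SPEC =====
def Spec_Scan_xy_py (img : Int) (threshold : Int) (sectors : List Int) (clean : Bool) (out : List (Int × Int)) : Prop := out = Scan_xy_py_alt img threshold sectors clean
instance (img : Int) (threshold : Int) (sectors : List Int) (clean : Bool) (out : List (Int × Int)) : Decidable (Spec_Scan_xy_py img threshold sectors clean out) := by unfold Spec_Scan_xy_py; infer_instance

-- ===== CLAIM (what is proved, stated in full; the proofs are below) =====
def Claim_equal_Scan_xy_py : Prop := ∀ (img : Int) (threshold : Int) (sectors : List Int) (clean : Bool), Dom_Scan_xy_py img threshold sectors clean → Spec_Scan_xy_py img threshold sectors clean (Scan_xy_py img threshold sectors clean)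

-- ===== LEMMAS AND PROOFS =====

-- proof-side view of the runs of `pairs` continued from an open run (k, f, l)
def rangesAux : List (Int × Int) → Int → Int → Int → List (Int × Int)
  | [], _, f, l => [(f, l)]
  | (i, v) :: rest, k, f, l =>
      if i - v = k then rangesAux rest k f v else (f, l) :: rangesAux rest (i - v) v v

theorem rangesAux_ne_nil (pairs : List (Int × Int)) (k f l : Int) :
    rangesAux pairs k f l ≠ [] := by
  cases pairs with
  | nil => simp [rangesAux]
  | cons p rest => obtain ⟨i, v⟩ := p; simp only [rangesAux]; split <;> simp [rangesAux_ne_nil]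

theorem bLoop_eq_foldl (th : Int) (pairs : List (Int × Int)) (k f l : Int)
    (st : Option (Int × Int) × List (Int × Int)) :
    bLoop th pairs (some (k, f, l)) st = (rangesAux pairs k f l).foldl (bEmit th) st := by
  induction pairs generalizing k f l st with
  | nil => simp [bLoop, rangesAux]
  | cons p rest ih =>
      obtain ⟨i, v⟩ := p
      simp only [bLoop, rangesAux]
      split <;> simp [ih]

-- getLastD of a nonempty list does not depend on the default
theorem getLastD_ne_default (b : Int) (t : List Int) (a d : Int) :
    (b :: t).getLastD a = (b :: t).getLastD d := by
  rw [List.getLastD_cons, List.getLastD_cons]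

theorem rev_getLastD (a : Int) (l : List Int) : (a :: l).reverse.getLastD 0 = a := by
  simp [List.getLastD_eq_getLast?, List.getLast?_reverse]

theorem rev_headD (a : Int) (l : List Int) : (a :: l).reverse.headD 0 = (a :: l).getLastD 0 := by
  rw [List.headD_eq_head?_getD, List.head?_reverse, ← List.getLastD_eq_getLast?]

theorem groups_map_eq_rangesAux (pairs : List (Int × Int)) (k a : Int) (acc : List Int) :
    (aGroupsAux pairs k (a :: acc)).map (fun g => (g.headD 0, g.getLastD 0)) =
      rangesAux pairs k ((a :: acc).getLastD 0) a := by
  induction pairs generalizing k a acc with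
  | nil =>
      simp only [aGroupsAux, rangesAux, List.map_cons, List.map_nil]
      rw [rev_headD, rev_getLastD]
  | cons p rest ih =>
      obtain ⟨i, v⟩ := p
      simp only [aGroupsAux, rangesAux]
      split
      · rw [ih k v (a :: acc), List.getLastD_cons, getLastD_ne_default a acc v 0]
      · rw [List.map_cons, rev_headD, rev_getLastD, ih (i - v) v []]
        simp

-- A's fold over the some-wrapped tail is B's bEmit fold from a `some` state
theorem foldl_aStep_some (th : Int) (rest : List (Int × Int)) (cur : Int × Int)
    (segs : List (Int × Int)) :
    rest.foldl (bEmit th) (some cur, segs) =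
      ((rest.map some).foldl (aStep th) (cur, segs)).map some id := by
  induction rest generalizing cur segs with
  | nil => simp
  | cons r rest ih =>
      simp only [List.foldl_cons, List.map_cons, bEmit, aStep]
      split <;> exact ih _ _

-- remove of values all different from the head keeps the head in place
theorem foldl_rem_cons (rs : List (Int × Int)) (x : Int × Int) (l : List (Int × Int))
    (h : ∀ r ∈ rs, r ≠ x) :
    rs.foldl (fun segs r => (PySem.List.remove? segs r).getD segs) (x :: l) =
      x :: rs.foldl (fun segs r => (PySem.List.remove? segs r).getD segs) l := by
  induction rs generalizing l with
  | nil => rfl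
  | cons r rs ih =>
      have hne : x ≠ r := fun he => (h r (by simp)) he.symm
      simp only [List.foldl_cons]
      rw [PySem.List.remove?_cons_of_ne l hne]
      cases hrem : PySem.List.remove? l r with
      | none => simpa [hrem] using ih l (fun r hr => h r (by simp [hr]))
      | some l' => simpa [hrem] using ih l' (fun r hr => h r (by simp [hr]))

theorem clean_eq_filter (th : Int) (l : List (Int × Int)) :
    aClean l th = l.filter (fun s => decide (th ≤ s.2 - s.1)) := by
  unfold aClean
  rw [show (fun (acc : List (Int × Int)) (s : Int × Int) =>
        if s.2 - s.1 < th then acc ++ [s] else acc) =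
      (fun acc s => if decide (s.2 - s.1 < th) = true then acc ++ [id s] else acc) by
    funext acc s; simp]
  rw [PySem.List.foldl_append_if]
  simp only [List.nil_append, List.map_id]
  induction l with
  | nil => rfl
  | cons x xs ih =>
      by_cases hx : x.2 - x.1 < th
      · rw [List.filter_cons_of_pos (by simpa using hx)]
        simp only [List.foldl_cons, PySem.List.remove?_cons_self, Option.getD_some]
        rw [ih, List.filter_cons_of_neg (by simpa using hx.not_ge)]
      · rw [List.filter_cons_of_neg (by simpa using hx)]
        rw [foldl_rem_cons _ _ _ (fun r hr => by
          intro he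
          have : r.2 - r.1 < th := by simpa using List.of_mem_filter hr
          exact hx (he ▸ this))]
        rw [ih, List.filter_cons_of_pos (by simpa using not_lt.mp hx)]

theorem Scan_xy_eq (img th : Int) (sectors : List Int) (clean : Bool) :
    Scan_xy_py img th sectors clean = Scan_xy_py_alt img th sectors clean := by
  cases sectors with
  | nil => cases clean <;> rfl
  | cons x xs =>
      unfold Scan_xy_py Scan_xy_py_alt
      rw [PySem.List.enumerate_cons]
      simp only [bLoop, zero_add]
      rw [bLoop_eq_foldl, groups_map_eq_rangesAux]
      simp only [List.getLastD_cons, List.getLastD_nil]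
      obtain ⟨r0, rrest, hr⟩ := List.exists_cons_of_ne_nil
        (rangesAux_ne_nil (PySem.List.enumerate xs 1) (0 - x) x x)
      rw [hr]
      rcases hfold : (rrest.map some).foldl (aStep th) (r0, []) with ⟨c, s⟩
      have hA : (List.foldl (aStep th) (r0, []) (rrest.map some ++ [none])).2 = s ++ [c] := by
        rw [List.foldl_append, hfold]; rfl
      have hB : List.foldl (bEmit th) (none, []) (r0 :: rrest) = (some c, s) := by
        rw [List.foldl_cons, show bEmit th (none, []) r0 = (some r0, []) from rfl,
          foldl_aStep_some, hfold]
        rfl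
      simp only [hA, hB]
      cases clean with
      | false => rfl
      | true => simp [clean_eq_filter]

-- ===== VERDICT (by name: the statement is the Claim_ definition above) =====
theorem Scan_xy_py_spec : Claim_equal_Scan_xy_py := by
  intro img th sectors clean _
  unfold Spec_Scan_xy_py
  exact Scan_xy_eq img th sectors clean
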